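-- pv_equiv track=rewrite | github.com/rusek/yorbay-python | yorbay/lang.py | get_lang_chain
-- ===== SOURCE A (Python) =====
-- def get_lang_chain(lang):
--     chain = []
--     if lang != 'root':
--         pos = len(lang)
--         while pos != -1:
--             chain.append(lang[:pos])
--             pos = lang.rfind('_', 0, pos)
--     chain.append('root')
--     return chain
-- ===== SOURCE B (Python) =====
-- def get_lang_chain(lang):
--     # Single forward pass: record the running prefix at each underscore,
--     # append the full string, then reverse (longest prefix first).
--     if lang == 'root':
--         return ['root']
--     chain = ['root']
--     prefix = ''
--     for c in lang:
--         if c == '_':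
--             chain.append(prefix)
--         prefix += c
--     chain.append(prefix)
--     chain.reverse()
--     return chain
-- ===== Notes on version B (the rewrite author's own statement) =====
-- stated objective: idiomatic
-- what changed: Replaces the repeated rfind-and-slice back-jumps with a single forward pass that records the running prefix at each underscore, appends the full string and reverses the chain.
import Mathlib
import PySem

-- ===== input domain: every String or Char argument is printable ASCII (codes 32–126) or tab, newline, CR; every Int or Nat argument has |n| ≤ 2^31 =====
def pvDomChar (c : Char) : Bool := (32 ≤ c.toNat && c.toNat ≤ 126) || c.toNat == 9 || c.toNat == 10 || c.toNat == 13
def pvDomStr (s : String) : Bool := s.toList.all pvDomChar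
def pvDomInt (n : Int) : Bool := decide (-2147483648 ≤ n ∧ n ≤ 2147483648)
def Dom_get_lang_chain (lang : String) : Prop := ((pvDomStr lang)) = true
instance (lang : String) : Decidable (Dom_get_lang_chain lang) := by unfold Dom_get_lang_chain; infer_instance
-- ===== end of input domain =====

-- B replaces A's repeated rfind-and-slice back-jumps by one forward pass that records the
-- running prefix at each underscore and reverses at the end (objective: idiomatic; same cost).

-- ===== PORT A =====
-- lang.rfind('_', 0, pos) for 0 ≤ pos ≤ len(lang): downward scan for the highest index
-- i < pos with lang[i] == '_', -1 if none — exact for this single-char, start=0 call pattern.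
def pvRfindU (cs : List Char) : Nat → Int
  | 0 => -1
  | p + 1 => if cs.getD p ' ' = '_' then (p : Int) else pvRfindU cs p

theorem pvRfindU_lt (cs : List Char) : ∀ pos p, pvRfindU cs pos = Int.ofNat p → p < pos := by
  intro pos
  induction pos with
  | zero => intro p h; simp only [pvRfindU, Int.ofNat_eq_natCast] at h; omega
  | succ q ih =>
    intro p h
    simp only [pvRfindU] at h
    split at h
    · simp only [Int.ofNat_eq_natCast] at h
      omega
    · exact Nat.lt_succ_of_lt (ih p h)

-- the 'while pos != -1' loop; pos is a Nat because the loop body only runs with pos ≥ 0,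
-- and lang[:pos] with 0 ≤ pos ≤ len(lang) is take pos (exact on that range).
def pvLoopA (cs : List Char) (pos : Nat) : List String :=
  String.mk (cs.take pos) ::
    (match h : pvRfindU cs pos with
     | Int.ofNat p => pvLoopA cs p
     | Int.negSucc _ => [])
termination_by pos
decreasing_by exact pvRfindU_lt cs pos _ h

def get_lang_chain (lang : String) : List String :=
  (if lang ≠ "root" then pvLoopA lang.toList lang.toList.length else []) ++ ["root"]

-- ===== PORT B =====
-- loop body: if c == '_': chain.append(prefix); prefix += c
def pvStepB (st : List String × List Char) (c : Char) : List String × List Char :=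
  ((if c = '_' then st.1 ++ [String.mk st.2] else st.1), st.2 ++ [c])

def get_lang_chain_alt (lang : String) : List String :=
  if lang = "root" then ["root"]
  else
    let st := lang.toList.foldl pvStepB (["root"], [])
    (st.1 ++ [String.mk st.2]).reverse

-- ===== PRECONDITION & SPEC =====
def Spec_get_lang_chain (lang : String) (out : List String) : Prop := out = get_lang_chain_alt lang
instance (lang : String) (out : List String) : Decidable (Spec_get_lang_chain lang out) := by unfold Spec_get_lang_chain; infer_instance

-- ===== CLAIM (what is proved, stated in full; the proofs are below) =====
def Claim_equal_get_lang_chain : Prop := ∀ (lang : String), Dom_get_lang_chain lang → Spec_get_lang_chain lang (get_lang_chain lang)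

-- ===== LEMMAS AND PROOFS =====

-- the underscore positions of cs below pos, in increasing order
def pvF (cs : List Char) (pos : Nat) : List Nat :=
  (List.range pos).filter (fun i => cs.getD i ' ' = '_')

theorem pvRfindU_negSucc (cs : List Char) : ∀ pos m, pvRfindU cs pos = Int.negSucc m →
    ∀ i, i < pos → ¬ cs.getD i ' ' = '_' := by
  intro pos
  induction pos with
  | zero => intro _ _ i hi; omega
  | succ q ih =>
    intro m h i hi
    simp only [pvRfindU] at h
    split at h
    · rw [Int.negSucc_eq] at h
      omega
    · rcases Nat.lt_succ_iff_lt_or_eq.mp hi with hlt | rfl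
      · exact ih m h i hlt
      · simpa using ‹¬ cs.getD i ' ' = '_'›

theorem pvRfindU_pos (cs : List Char) : ∀ pos p, pvRfindU cs pos = Int.ofNat p →
    cs.getD p ' ' = '_' ∧ ∀ i, p < i → i < pos → ¬ cs.getD i ' ' = '_' := by
  intro pos
  induction pos with
  | zero => intro p h; simp only [pvRfindU, Int.ofNat_eq_natCast] at h; omega
  | succ q ih =>
    intro p h
    simp only [pvRfindU] at h
    split at h
    · have hpq : p = q := by simp only [Int.ofNat_eq_natCast] at h; omega
      subst hpq
      exact ⟨‹cs.getD p ' ' = '_'›, fun i h1 h2 => by omega⟩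
    · obtain ⟨h1, h2⟩ := ih p h
      have hpq := pvRfindU_lt cs q p h
      refine ⟨h1, fun i hp hq => ?_⟩
      rcases Nat.lt_succ_iff_lt_or_eq.mp hq with hlt | rfl
      · exact h2 i hp hlt
      · simpa using ‹¬ cs.getD i ' ' = '_'›

theorem pvF_ext (cs : List Char) (a b : Nat) (hab : a ≤ b)
    (h : ∀ i, a ≤ i → i < b → ¬ cs.getD i ' ' = '_') : pvF cs b = pvF cs a := by
  induction b, hab using Nat.le_induction with
  | base => rfl
  | succ m hm ih =>
    have hm' := h m hm (Nat.lt_succ_self m)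
    rw [List.getD_eq_getElem?_getD] at hm'
    have : pvF cs (m + 1) = pvF cs m := by
      simp [pvF, List.range_succ, List.filter_append, hm']
    rw [this, ih (fun i h1 h2 => h i h1 (Nat.lt_succ_of_lt h2))]

theorem pvF_snoc (cs : List Char) (p : Nat) (hp : cs.getD p ' ' = '_') :
    pvF cs (p + 1) = pvF cs p ++ [p] := by
  rw [List.getD_eq_getElem?_getD] at hp
  simp [pvF, List.range_succ, List.filter_append, hp]

theorem pvLoopA_eq (cs : List Char) : ∀ pos, pvLoopA cs pos =
    (pos :: (pvF cs pos).reverse).map (fun k => String.mk (cs.take k)) := by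
  intro pos
  induction pos using Nat.strong_induction_on with
  | _ pos ih =>
    rw [pvLoopA]
    split
    · next p h =>
      obtain ⟨h1, h2⟩ := pvRfindU_pos cs pos p h
      have hlt := pvRfindU_lt cs pos p h
      have hF : pvF cs pos = pvF cs p ++ [p] := by
        rw [pvF_ext cs (p + 1) pos hlt (fun i ha hb => h2 i ha hb), pvF_snoc cs p h1]
      rw [ih p hlt, hF]
      simp
    · next m h =>
      have hnone : pvF cs pos = [] := by
        apply List.filter_eq_nil_iff.mpr
        intro i hi
        simpa using pvRfindU_negSucc cs pos m h i (List.mem_range.mp hi)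
      rw [hnone]
      simp

theorem pvFoldB_eq (cs : List Char) : ∀ (chain : List String) (pre : List Char),
    cs.foldl pvStepB (chain, pre) =
      (chain ++ (pvF cs cs.length).map (fun i => String.mk (pre ++ cs.take i)), pre ++ cs) := by
  induction cs with
  | nil => intro chain pre; simp [pvF]
  | cons c rest ih =>
    intro chain pre
    have hF : pvF (c :: rest) (rest.length + 1) =
        (if c = '_' then [0] else []) ++ (pvF rest rest.length).map Nat.succ := by
      simp only [pvF, List.range_succ_eq_map, List.filter_cons]
      rw [List.filter_map]
      split_ifs with hc <;> · simp_all [Function.comp_def]; try rfl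
    simp only [List.length_cons, List.foldl_cons, hF, pvStepB]
    rw [ih]
    split_ifs with hc
    · subst hc
      simp [List.take_succ_cons]
    · simp [List.take_succ_cons]

-- ===== VERDICT (by name: the statement is the Claim_ definition above) =====
theorem get_lang_chain_spec : Claim_equal_get_lang_chain := by
  intro lang _
  unfold Spec_get_lang_chain get_lang_chain get_lang_chain_alt
  by_cases hr : lang = "root"
  · simp [hr]
  · rw [if_neg hr, if_pos (by exact hr)]
    rw [pvLoopA_eq, pvFoldB_eq]
    simp [List.map_reverse, List.take_of_length_le (le_of_eq String.length_toList)]
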